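-- pv_equiv track=rewrite | github.com/rlarbfl081513/python_master | algorithm/Graph/1_Basic_Navigation/Queue/swea/1225_pw-create.py | recursion_minus
-- ===== SOURCE A (Python) =====
-- def recursion_minus(li, num):
--
--     if num > 5:
--         return li
--
--     value = li[0] - num
--
--     if value <= 0:
--         value = 0
--         li = li[1:] + [value]
--         return li
--
--     li = li[1:] + [value]
--     return recursion_minus(li, num+1)
-- ===== SOURCE B (Python) =====
-- def recursion_minus(li, num):
--     while num <= 5:
--         value = li[0] - num
--         if value <= 0:
--             return li[1:] + [0]
--         li = li[1:] + [value]
--         num += 1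
--     return li
-- ===== Notes on version B (the rewrite author's own statement) =====
-- stated objective: simpler
-- what changed: The tail recursion with an early-return base case is rewritten as an iterative while-loop that updates the list and counter in place; same slice-and-append step, no recursion.
-- outside the precondition, e.g. on recursion_minus([1000000000], -950): A returns [1000451710], B returns [1000451710]
import Mathlib
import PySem

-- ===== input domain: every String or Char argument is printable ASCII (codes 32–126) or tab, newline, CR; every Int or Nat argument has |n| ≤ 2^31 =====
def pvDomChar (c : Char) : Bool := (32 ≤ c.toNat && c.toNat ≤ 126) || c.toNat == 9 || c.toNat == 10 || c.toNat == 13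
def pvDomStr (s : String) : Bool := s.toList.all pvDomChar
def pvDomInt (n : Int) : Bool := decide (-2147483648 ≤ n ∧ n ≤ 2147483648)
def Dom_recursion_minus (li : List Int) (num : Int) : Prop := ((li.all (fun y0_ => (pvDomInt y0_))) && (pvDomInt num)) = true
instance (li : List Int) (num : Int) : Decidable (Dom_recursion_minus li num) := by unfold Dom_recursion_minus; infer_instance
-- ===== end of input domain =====

-- B replaces A's tail recursion by an iterative while-loop over the same state (simpler decomposition, same cost).

-- ===== PORT A =====
def recursion_minus (li : List Int) (num : Int) : List Int :=
  if num > 5 then li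
  else
    match PySem.List.pyGet? li 0 with
    | none => []  -- li[0] raises IndexError here; excluded by Pre_
    | some h =>
      let value := h - num
      if value ≤ 0 then PySem.List.slice li (some 1) none ++ [0]
      else recursion_minus (PySem.List.slice li (some 1) none ++ [value]) (num + 1)
termination_by (6 - num).toNat
decreasing_by omega

-- ===== PORT B =====
-- the while loop: fuel = number of remaining iterations (num ≤ 5 holds for exactly (6-num).toNat steps)
def rmLoop : Nat → List Int → Int → List Int
  | 0, li, _ => li
  | fuel + 1, li, num =>
    match PySem.List.pyGet? li 0 with
    | none => []  -- li[0] raises IndexError here; excluded by Pre_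
    | some h =>
      if h - num ≤ 0 then li.tail ++ [0]
      else rmLoop fuel (li.tail ++ [h - num]) (num + 1)

def recursion_minus_alt (li : List Int) (num : Int) : List Int :=
  rmLoop (6 - num).toNat li num

-- ===== PRECONDITION & SPEC =====
-- Pre_ excludes the inputs where A raises: an empty list with num ≤ 5 (IndexError), and very negative num,
-- where A's recursion depth approaches CPython's recursion limit (RecursionError near num ≈ -990; the exact
-- cutoff depends on interpreter stack state, so Pre_ keeps a margin at -900).
def Pre_recursion_minus (li : List Int) (num : Int) : Prop := num > 5 ∨ (li ≠ [] ∧ -900 ≤ num)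
instance (li : List Int) (num : Int) : Decidable (Pre_recursion_minus li num) := by unfold Pre_recursion_minus; infer_instance
def pvWitness_recursion_minus : List Int × Int := ([7, 2, 9], 1)

def Spec_recursion_minus (li : List Int) (num : Int) (out : List Int) : Prop := out = recursion_minus_alt li num
instance (li : List Int) (num : Int) (out : List Int) : Decidable (Spec_recursion_minus li num out) := by unfold Spec_recursion_minus; infer_instance

-- ===== CLAIM (what is proved, stated in full; the proofs are below) =====
def Claim_equal_recursion_minus : Prop := ∀ (li : List Int) (num : Int), Dom_recursion_minus li num → Pre_recursion_minus li num → Spec_recursion_minus li num (recursion_minus li num)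

-- ===== LEMMAS AND PROOFS =====

theorem rm_eq_loop (fuel : Nat) : ∀ (li : List Int) (num : Int),
    fuel = (6 - num).toNat → li ≠ [] →
    recursion_minus li num = rmLoop fuel li num := by
  induction fuel with
  | zero =>
    intro li num hf _
    have h5 : num > 5 := by omega
    rw [recursion_minus]
    simp [h5, rmLoop]
  | succ n ih =>
    intro li num hf hne
    have h5 : ¬ num > 5 := by omega
    rw [recursion_minus]
    cases li with
    | nil => exact absurd rfl hne
    | cons x xs =>
      by_cases hv : x - num ≤ 0
      · simp [h5, rmLoop, PySem.List.pyGet?, PySem.List.pyIdx?, PySem.List.slice_from_one, hv]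
      · simp only [h5, if_false, rmLoop]
        simp [PySem.List.pyGet?, PySem.List.pyIdx?, PySem.List.slice_from_one, hv]
        exact ih (xs ++ [x - num]) (num + 1) (by omega) (by simp)

-- ===== VERDICT (by name: the statement is the Claim_ definition above) =====
theorem recursion_minus_spec : Claim_equal_recursion_minus := by
  intro li num _ hpre
  unfold Spec_recursion_minus recursion_minus_alt
  rcases hpre with h5 | ⟨hne, _⟩
  swap
  · exact rm_eq_loop _ li num rfl hne
  · rw [recursion_minus]
    have : (6 - num).toNat = 0 := by omega
    simp [h5, this, rmLoop]
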